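-- pv_equiv track=rewrite | github.com/SamirMishra27/dsa-assignment-solutions | Recursion/Assignment 8.py | countSubstringWithEqualEnds
-- ===== SOURCE A (Python) =====
-- def countSubstringWithEqualEnds(s):
--     # code here
--     x, y, z, n = 0, 0, 0, len(s)
--
--     while x < n:
--         while y < n:
--             if s[x] == s[y]:
--                 z += 1
--             y += 1
--         x += 1
--         y = x
--     return z
-- ===== SOURCE B (Python) =====
-- def countSubstringWithEqualEnds(s):
--     # One pass: each position contributes 1 + (number of earlier equal chars),
--     # tracked with a frequency dict, instead of A's nested index scan.
--     freq = {}
--     total = 0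
--     for ch in s:
--         c = freq.get(ch, 0) + 1
--         freq[ch] = c
--         total += c
--     return total
-- ===== Notes on version B (the rewrite author's own statement) =====
-- stated objective: faster
-- what changed: Replaced the nested index scan over all pairs by a single pass keeping a character-frequency dict and adding the running count of each character.
import Mathlib
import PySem

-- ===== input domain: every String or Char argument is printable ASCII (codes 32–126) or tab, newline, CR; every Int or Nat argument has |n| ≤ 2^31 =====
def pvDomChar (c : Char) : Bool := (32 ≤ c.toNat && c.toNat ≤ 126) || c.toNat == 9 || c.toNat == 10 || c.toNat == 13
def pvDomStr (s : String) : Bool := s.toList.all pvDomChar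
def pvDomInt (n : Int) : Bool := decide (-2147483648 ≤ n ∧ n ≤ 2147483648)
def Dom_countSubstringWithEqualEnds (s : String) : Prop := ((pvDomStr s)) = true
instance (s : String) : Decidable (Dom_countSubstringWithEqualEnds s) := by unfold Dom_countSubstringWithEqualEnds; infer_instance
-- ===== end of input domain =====

-- B replaces A's quadratic nested index scan by one pass with a character-frequency dict (asymptotically faster).

-- ===== PORT A =====
-- inner 'while y < n' loop: scans indices y..n-1 adding 1 whenever s[y] = s[x] (c = s[x])
def pvInnerA (l : List Char) (c : Char) (n y : Nat) (z : Int) : Int :=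
  if y < n then pvInnerA l c n (y + 1) (z + if l.getD y ' ' = c then 1 else 0) else z
termination_by n - y

-- outer 'while x < n' loop: after each inner pass y is reset to the new x
def pvOuterA (l : List Char) (n x : Nat) (z : Int) : Int :=
  if x < n then pvOuterA l n (x + 1) (pvInnerA l (l.getD x ' ') n x z) else z
termination_by n - x

def countSubstringWithEqualEnds (s : String) : Int :=
  pvOuterA s.toList s.toList.length 0 0

-- ===== PORT B =====
-- 'for ch in s': bump ch's count in the dict, add the new count to the total
def pvAltB : List Char → PySem.Dict Char Int → Int → Int
  | [], _, total => total
  | ch :: rest, freq, total =>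
      let c := freq.getD ch 0 + 1
      pvAltB rest (freq.insert ch c) (total + c)

def countSubstringWithEqualEnds_alt (s : String) : Int :=
  pvAltB s.toList PySem.Dict.empty 0

-- ===== PRECONDITION & SPEC =====
def Spec_countSubstringWithEqualEnds (s : String) (out : Int) : Prop := out = countSubstringWithEqualEnds_alt s
instance (s : String) (out : Int) : Decidable (Spec_countSubstringWithEqualEnds s out) := by unfold Spec_countSubstringWithEqualEnds; infer_instance

-- ===== CLAIM (what is proved, stated in full; the proofs are below) =====
def Claim_equal_countSubstringWithEqualEnds : Prop := ∀ (s : String), Dom_countSubstringWithEqualEnds s → Spec_countSubstringWithEqualEnds s (countSubstringWithEqualEnds s)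

-- ===== LEMMAS AND PROOFS =====

-- canonical value: pairs i ≤ j with l[i] = l[j], decomposed from the front
def pvPairs : List Char → Int
  | [] => 0
  | a :: t => (1 + (t.count a : Int)) + pvPairs t

-- pairs with one end in p and the other in l
def pvCross (p l : List Char) : Int := (l.map (fun c => ((p.count c : Nat) : Int))).sum

theorem pvInnerA_spec (l : List Char) (c : Char) :
    ∀ y z, y ≤ l.length → pvInnerA l c l.length y z = z + ((l.drop y).count c : Int) := by
  intro y
  induction hfuel : l.length - y using Nat.strong_induction_on generalizing y with
  | _ fuel ih =>
    intro z hy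
    rw [pvInnerA]
    by_cases h : y < l.length
    · rw [if_pos h]
      have hd : l.drop y = l[y] :: l.drop (y + 1) := List.drop_eq_getElem_cons h
      have hg : l.getD y ' ' = l[y] := by
        simp [List.getD, List.getElem?_eq_getElem h]
      rw [ih (l.length - (y + 1)) (by omega) (y + 1) rfl _ (by omega), hd, hg,
        List.count_cons]
      by_cases hc : l[y] = c <;> simp [hc, add_assoc] <;> ring
    · rw [if_neg h]
      have : l.drop y = [] := List.drop_eq_nil_of_le (by omega)
      simp [this]

theorem pvOuterA_spec (l : List Char) :
    ∀ x z, x ≤ l.length → pvOuterA l l.length x z = z + pvPairs (l.drop x) := by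
  intro x
  induction hfuel : l.length - x using Nat.strong_induction_on generalizing x with
  | _ fuel ih =>
    intro z hx
    rw [pvOuterA]
    by_cases h : x < l.length
    · rw [if_pos h, pvInnerA_spec l _ x z (by omega),
        ih (l.length - (x + 1)) (by omega) (x + 1) rfl _ (by omega)]
      have hd : l.drop x = l[x] :: l.drop (x + 1) := List.drop_eq_getElem_cons h
      have hg : l.getD x ' ' = l[x] := by
        simp [List.getD, List.getElem?_eq_getElem h]
      rw [hg, hd, pvPairs, List.count_cons_self]
      push_cast; ring
    · rw [if_neg h]
      have : l.drop x = [] := List.drop_eq_nil_of_le (by omega)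
      simp [this, pvPairs]

theorem pvCross_append_singleton (p : List Char) (a : Char) :
    ∀ l, pvCross (p ++ [a]) l = pvCross p l + (l.count a : Int) := by
  intro l
  induction l with
  | nil => simp [pvCross]
  | cons b t ihl =>
    simp only [pvCross, List.map_cons, List.sum_cons, List.count_cons] at *
    rw [ihl]
    by_cases hb : b = a
    · simp [hb, List.count_append]; ring
    · have : ¬ (a = b) := fun h => hb h.symm
      simp [List.count_append, hb, this]; ring

theorem pvAltB_spec :
    ∀ (l p : List Char) (d : PySem.Dict Char Int) (total : Int),
      (∀ c, d.getD c 0 = (p.count c : Int)) →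
      pvAltB l d total = total + pvPairs l + pvCross p l := by
  intro l
  induction l with
  | nil => intro p d total _; simp [pvAltB, pvPairs, pvCross]
  | cons ch rest ih =>
    intro p d total hinv
    rw [pvAltB]
    have hnew : ∀ c, ((d.insert ch (d.getD ch 0 + 1)).getD c 0) = ((p ++ [ch]).count c : Int) := by
      intro c
      rw [PySem.Dict.getD_insert]
      by_cases hc : c = ch
      · simp [hc, hinv ch, List.count_append]
      · have : ¬ (ch = c) := fun h => hc h.symm
        simp [hc, hinv c, List.count_append, this]
    rw [ih (p ++ [ch]) _ _ hnew, pvCross_append_singleton, hinv ch]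
    simp only [pvPairs, pvCross, List.map_cons, List.sum_cons]
    ring

-- ===== VERDICT (by name: the statement is the Claim_ definition above) =====
theorem countSubstringWithEqualEnds_spec : Claim_equal_countSubstringWithEqualEnds := by
  intro s _
  unfold Spec_countSubstringWithEqualEnds countSubstringWithEqualEnds countSubstringWithEqualEnds_alt
  rw [pvOuterA_spec s.toList 0 0 (by omega),
    pvAltB_spec s.toList [] PySem.Dict.empty 0 (by intro c; simp [PySem.Dict.getD_empty])]
  simp [pvCross]
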